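-- pv_equiv track=rewrite | github.com/avigaildanesh/Artificial-Intelligence-Course-Exercises | ex2/Solution2/ex2.py | find_sequences_of_colors
-- ===== SOURCE A (Python) =====
-- def find_sequences_of_colors(line_of_balls):
--     """This function finds sequences of all colors in the line of balls.
--     Returns a dictionary where keys are colors and values are lists of sequences of that color.
--     """
--
--     sequences = {}
--     current_sequence = []
--     current_color = None
--
--     for ball in line_of_balls:
--         if current_color is None or current_color != ball:
--             if current_sequence:
--                 if len(current_sequence) >= 3:
--                     sequences[current_color] = sequences.get(current_color, []) + [current_sequence]
--             current_color = ball
--             current_sequence = [ball]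
--         else:
--             current_sequence.append(ball)
--
--     if current_sequence:
--         if len(current_sequence) >= 3:
--             sequences[current_color] = sequences.get(current_color, []) + [current_sequence]
--
--     return {color: tuple(sequence) for color, sequence_list in sequences.items() for sequence in sequence_list}
-- ===== SOURCE B (Python) =====
-- def find_sequences_of_colors(line_of_balls):
--     """Two-pointer run scanner: jump from run start to run end; record each run
--     of length >= 3 directly in the result dict (later runs of a color overwrite
--     earlier ones, as in the original)."""
--     result = {}
--     i, n = 0, len(line_of_balls)
--     while i < n:
--         j = i
--         while j < n and line_of_balls[j] == line_of_balls[i]: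
--             j += 1
--         if j - i >= 3:
--             result[line_of_balls[i]] = tuple(line_of_balls[i:j])
--         i = j
--     return result
-- ===== Notes on version B (the rewrite author's own statement) =====
-- stated objective: simpler
-- what changed: Replaces A's per-ball state machine (current_color/current_sequence, post-loop flush, dict of run-lists flattened by a final comprehension) with a two-pointer scan that jumps from run start to run end and writes each qualifying run straight into the result dict.
import Mathlib
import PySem

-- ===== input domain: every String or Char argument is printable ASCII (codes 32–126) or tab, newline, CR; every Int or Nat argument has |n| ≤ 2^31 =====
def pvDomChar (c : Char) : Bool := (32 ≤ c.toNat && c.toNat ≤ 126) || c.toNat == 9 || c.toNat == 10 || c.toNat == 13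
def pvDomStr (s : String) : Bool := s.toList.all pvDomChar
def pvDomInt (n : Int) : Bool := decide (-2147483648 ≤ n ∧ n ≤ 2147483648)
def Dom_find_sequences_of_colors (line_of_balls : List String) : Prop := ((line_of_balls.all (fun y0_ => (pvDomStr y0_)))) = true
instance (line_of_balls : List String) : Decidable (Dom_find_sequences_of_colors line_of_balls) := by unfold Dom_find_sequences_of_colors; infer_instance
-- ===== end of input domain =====

-- B replaces A's per-ball state machine (current_color/current_sequence, post-loop flush,
-- dict of run-lists flattened by a final comprehension) with a two-pointer run scan that
-- writes each qualifying run straight into the result dict (objective: simpler).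

-- ===== PORT A =====
-- `if current_sequence: if len(current_sequence) >= 3: sequences[current_color] = sequences.get(current_color, []) + [current_sequence]`
def pvAFlush (seqs : PySem.Dict String (List (List String))) (cur : List String)
    (col : Option String) : PySem.Dict String (List (List String)) :=
  if cur ≠ [] ∧ 3 ≤ cur.length then
    seqs.insert (col.getD "") (seqs.getD (col.getD "") [] ++ [cur])
  else seqs

def pvAFlushSt (st : PySem.Dict String (List (List String)) × List String × Option String) :
    PySem.Dict String (List (List String)) :=
  pvAFlush st.1 st.2.1 st.2.2

-- one iteration of A's `for ball in line_of_balls`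
def pvAStep (st : PySem.Dict String (List (List String)) × List String × Option String)
    (ball : String) : PySem.Dict String (List (List String)) × List String × Option String :=
  if st.2.2 = none ∨ st.2.2 ≠ some ball then (pvAFlushSt st, [ball], some ball)
  else (st.1, st.2.1 ++ [ball], st.2.2)

-- `{color: tuple(sequence) for color, sequence_list in sequences.items() for sequence in sequence_list}`
def pvAFlatten (seqs : PySem.Dict String (List (List String))) : PySem.Dict String (List String) :=
  seqs.items.foldl (fun r p => p.2.foldl (fun r s => r.insert p.1 s) r) PySem.Dict.empty

def find_sequences_of_colors (line_of_balls : List String) : List (String × List String) :=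
  (pvAFlatten (pvAFlushSt (line_of_balls.foldl pvAStep (PySem.Dict.empty, [], none)))).items

-- ===== PORT B =====
-- `while j < n and line[j] == line[i]: j += 1` — the maximal run at the head, then the rest
def pvRunsF : Nat → List String → List (String × List String)
  | 0, _ => []
  | _ + 1, [] => []
  | fuel + 1, x :: xs => (x, x :: xs.takeWhile (· == x)) :: pvRunsF fuel (xs.dropWhile (· == x))

def pvRuns (l : List String) : List (String × List String) := pvRunsF l.length l

-- `if j - i >= 3: result[line[i]] = tuple(line[i:j])`
def pvBStep (r : PySem.Dict String (List String)) (p : String × List String) :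
    PySem.Dict String (List String) :=
  if 3 ≤ p.2.length then r.insert p.1 p.2 else r

def find_sequences_of_colors_alt (line_of_balls : List String) : List (String × List String) :=
  ((pvRuns line_of_balls).foldl pvBStep PySem.Dict.empty).items

-- ===== PRECONDITION & SPEC =====
def Spec_find_sequences_of_colors (line_of_balls : List String) (out : List (String × List String)) : Prop := out = find_sequences_of_colors_alt line_of_balls
instance (line_of_balls : List String) (out : List (String × List String)) : Decidable (Spec_find_sequences_of_colors line_of_balls out) := by unfold Spec_find_sequences_of_colors; infer_instance

-- ===== CLAIM (what is proved, stated in full; the proofs are below) =====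
def Claim_equal_find_sequences_of_colors : Prop := ∀ (line_of_balls : List String), Dom_find_sequences_of_colors line_of_balls → Spec_find_sequences_of_colors line_of_balls (find_sequences_of_colors line_of_balls)

-- ===== LEMMAS AND PROOFS =====

theorem pvRunsF_congr : ∀ (n m : Nat) (l : List String), l.length ≤ n → l.length ≤ m →
    pvRunsF n l = pvRunsF m l := by
  intro n
  induction n with
  | zero =>
    intro m l hn _
    have : l = [] := List.eq_nil_of_length_eq_zero (Nat.le_zero.mp hn)
    subst this
    cases m <;> rfl
  | succ n ih =>
    intro m l hn hm
    cases l with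
    | nil => cases m <;> rfl
    | cons x xs =>
      cases m with
      | zero => simp at hm
      | succ m =>
        simp only [pvRunsF]
        congr 1
        exact ih m _ (Nat.le_trans (List.length_dropWhile_le _ _) (Nat.succ_le_succ_iff.mp hn))
          (Nat.le_trans (List.length_dropWhile_le _ _) (Nat.succ_le_succ_iff.mp hm))

theorem pvRuns_nil : pvRuns [] = [] := rfl

theorem pvRuns_cons (x : String) (xs : List String) :
    pvRuns (x :: xs) = (x, x :: xs.takeWhile (· == x)) :: pvRuns (xs.dropWhile (· == x)) := by
  show pvRunsF (xs.length + 1) (x :: xs) = _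
  simp only [pvRunsF]
  congr 1
  exact pvRunsF_congr xs.length _ _ (List.length_dropWhile_le _ _) (Nat.le_refl _)

-- A's dict update on one completed run
def pvAddRun (seqs : PySem.Dict String (List (List String))) (p : String × List String) :
    PySem.Dict String (List (List String)) :=
  if 3 ≤ p.2.length then seqs.insert p.1 (seqs.getD p.1 [] ++ [p.2]) else seqs

-- the last run recorded for a color (what the final comprehension keeps)
def pvLastMap (p : String × List (List String)) : String × List String := (p.1, p.2.getLastD [])

-- A's loop from a live state (nonempty current run of color c) = run-fold over pvRuns
theorem pvA_loop_runs (xs : List String) (seqs : PySem.Dict String (List (List String)))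
    (c : String) (cur : List String) (hcur : cur ≠ []) :
    pvAFlushSt (xs.foldl pvAStep (seqs, cur, some c))
    = (pvRuns (xs.dropWhile (· == c))).foldl pvAddRun
        (pvAddRun seqs (c, cur ++ xs.takeWhile (· == c))) := by
  induction xs generalizing seqs c cur with
  | nil =>
    simp [pvRuns_nil, pvAFlushSt, pvAFlush, pvAddRun, hcur]
  | cons b rest ih =>
    by_cases hbc : c = b
    · subst hbc
      have hstep : pvAStep (seqs, cur, some c) c = (seqs, cur ++ [c], some c) := by
        simp [pvAStep]
      rw [List.foldl_cons, hstep, ih seqs c (cur ++ [c]) (by simp)]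
      simp [List.append_assoc]
    · have hstep : pvAStep (seqs, cur, some c) b = (pvAFlushSt (seqs, cur, some c), [b], some b) := by
        simp [pvAStep, hbc]
      rw [List.foldl_cons, hstep, ih _ b [b] (by simp)]
      have hflush : pvAFlushSt (seqs, cur, some c) = pvAddRun seqs (c, cur) := by
        simp [pvAFlushSt, pvAFlush, pvAddRun, hcur]
      have hbeq : (b == c) = false := by simp [Ne.symm hbc]
      simp [pvRuns_cons, hbeq, hflush]

-- whole A loop + final flush = run-fold over pvRuns from the empty dict
theorem pvA_seqs_eq (line : List String) :
    pvAFlushSt (line.foldl pvAStep (PySem.Dict.empty, [], none))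
    = (pvRuns line).foldl pvAddRun PySem.Dict.empty := by
  cases line with
  | nil => simp [pvRuns_nil, pvAFlushSt, pvAFlush]
  | cons x xs =>
    have hstep : pvAStep (PySem.Dict.empty, [], none) x = (PySem.Dict.empty, [x], some x) := by
      simp [pvAStep, pvAFlushSt, pvAFlush]
    rw [List.foldl_cons, hstep, pvA_loop_runs xs _ x [x] (by simp)]
    simp [pvRuns_cons]

-- repeated overwrite of one key keeps the last value
theorem pvInsert_foldl (l : List (List String)) (r : PySem.Dict String (List String))
    (c : String) (v : List String) :
    l.foldl (fun r s => r.insert c s) (r.insert c v) = r.insert c (l.getLastD v) := by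
  induction l generalizing v with
  | nil => simp
  | cons s t ih =>
    rw [List.foldl_cons, PySem.Dict.insert_insert_self, ih, List.getLastD_cons]

-- flattening a dict-of-runs with fresh, distinct keys appends one (color, last run) per item
theorem pvFlatten_items (l : List (String × List (List String))) :
    ∀ r : PySem.Dict String (List String),
    (∀ p ∈ l, p.2 ≠ []) → (∀ p ∈ l, r.contains p.1 = false) → (l.map (·.1)).Nodup →
    (l.foldl (fun r p => p.2.foldl (fun r s => r.insert p.1 s) r) r).items
      = r.items ++ l.map pvLastMap := by
  induction l with
  | nil => intro r _ _ _; simp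
  | cons p t ih =>
    intro r hne hfresh hnd
    obtain ⟨c, v⟩ := p
    have hv : v ≠ [] := hne (c, v) (by simp)
    obtain ⟨s, rest, rfl⟩ : ∃ s rest, v = s :: rest := by
      cases v with
      | nil => exact absurd rfl hv
      | cons a b => exact ⟨a, b, rfl⟩
    have hcr : r.contains c = false := hfresh (c, s :: rest) (by simp)
    have hnd' : (c :: t.map (·.1)).Nodup := by simpa using hnd
    have hcmem : c ∉ t.map (·.1) := (List.nodup_cons.mp hnd').1
    rw [List.foldl_cons]
    have hinner : (s :: rest).foldl (fun r s => r.insert c s) r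
        = r.insert c (rest.getLastD s) := by
      rw [List.foldl_cons, pvInsert_foldl]
    rw [hinner, ih _ (fun q hq => hne q (by simp [hq]))
      (fun q hq => by
        rw [PySem.Dict.contains_insert]
        have hq1 : (q.1 == c) = false := by
          have : q.1 ∈ t.map (·.1) := List.mem_map.mpr ⟨q, hq, rfl⟩
          simp only [beq_eq_false_iff_ne, ne_eq]
          rintro rfl; exact hcmem this
        simp [hq1, hfresh q (by simp [hq])])
      ((List.nodup_cons.mp hnd').2)]
    rw [PySem.Dict.items_insert_of_not_contains _ _ hcr]
    simp [pvLastMap, List.append_assoc]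
    cases rest with
    | nil => rfl
    | cons a l =>
      rw [List.getLast?_cons_cons]
      cases h : (a :: l).getLast? with
      | none => simp at h
      | some x => rfl

-- one run: A's append-to-run-list update tracks B's overwrite, through pvLastMap
theorem pvStep_pres (seqs : PySem.Dict String (List (List String)))
    (d : PySem.Dict String (List String)) (q : String × List String)
    (hitems : d.items = seqs.items.map pvLastMap) (hnd : seqs.keys.Nodup)
    (hne : ∀ p ∈ seqs.items, p.2 ≠ []) :
    (pvBStep d q).items = (pvAddRun seqs q).items.map pvLastMap
      ∧ (pvAddRun seqs q).keys.Nodup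
      ∧ ∀ p ∈ (pvAddRun seqs q).items, p.2 ≠ [] := by
  obtain ⟨c, run⟩ := q
  by_cases h3 : 3 ≤ run.length
  · have hkeys : d.keys = seqs.keys := by
      show d.items.map (·.1) = seqs.items.map (·.1)
      rw [hitems, List.map_map]; rfl
    have hc : d.contains c = seqs.contains c := by
      rw [PySem.Dict.contains_eq_decide_mem_keys, PySem.Dict.contains_eq_decide_mem_keys, hkeys]
    cases hcc : seqs.contains c with
    | true =>
      refine ⟨?_, ?_, ?_⟩
      · simp only [pvBStep, pvAddRun, h3, if_pos]
        rw [PySem.Dict.items_insert_of_contains _ _ (hc.trans hcc),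
          PySem.Dict.items_insert_of_contains _ _ hcc, hitems, List.map_map, List.map_map]
        refine List.map_congr_left fun p _ => ?_
        by_cases hpc : p.1 = c
        · simp [Function.comp, pvLastMap, hpc]
        · simp [Function.comp, pvLastMap, hpc]
      · simp only [pvAddRun, h3, if_pos]
        rw [PySem.Dict.keys_insert_of_contains _ _ hcc]; exact hnd
      · intro p hp
        simp only [pvAddRun, h3, if_pos] at hp
        rcases (PySem.Dict.mem_items_insert _ _ _ _).mp hp with h | h
        · subst h; simp
        · exact hne p h.1
    | false =>
      refine ⟨?_, ?_, ?_⟩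
      · simp only [pvBStep, pvAddRun, h3, if_pos]
        rw [PySem.Dict.items_insert_of_not_contains _ _ (hc.trans hcc),
          PySem.Dict.items_insert_of_not_contains _ _ hcc,
          PySem.Dict.getD_of_not_contains _ _ hcc, hitems]
        simp [pvLastMap]
      · simp only [pvAddRun, h3, if_pos]
        rw [PySem.Dict.keys_insert_of_not_contains _ _ hcc]
        have hcmem : c ∉ seqs.keys := by
          have := PySem.Dict.contains_eq_decide_mem_keys seqs c
          rw [hcc] at this
          simpa using this.symm
        simp [List.nodup_append, hnd]
        exact fun a ha h => hcmem (h ▸ ha)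
      · intro p hp
        simp only [pvAddRun, h3, if_pos] at hp
        rw [PySem.Dict.items_insert_of_not_contains _ _ hcc] at hp
        rcases List.mem_append.mp hp with h | h
        · exact hne p h
        · simp only [List.mem_singleton] at h; subst h; simp
  · exact ⟨by simp [pvBStep, pvAddRun, h3, hitems], by simp [pvAddRun, h3, hnd],
      by simpa [pvAddRun, h3] using hne⟩

theorem pvFold_pres (cs : List (String × List String)) :
    ∀ (seqs : PySem.Dict String (List (List String))) (d : PySem.Dict String (List String)),
    d.items = seqs.items.map pvLastMap → seqs.keys.Nodup → (∀ p ∈ seqs.items, p.2 ≠ []) →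
    (cs.foldl pvBStep d).items = (cs.foldl pvAddRun seqs).items.map pvLastMap
      ∧ (cs.foldl pvAddRun seqs).keys.Nodup
      ∧ ∀ p ∈ (cs.foldl pvAddRun seqs).items, p.2 ≠ [] := by
  induction cs with
  | nil => intro seqs d h1 h2 h3; exact ⟨h1, h2, h3⟩
  | cons q t ih =>
    intro seqs d h1 h2 h3
    obtain ⟨g1, g2, g3⟩ := pvStep_pres seqs d q h1 h2 h3
    simpa using ih (pvAddRun seqs q) (pvBStep d q) g1 g2 g3

-- ===== VERDICT (by name: the statement is the Claim_ definition above) =====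
theorem find_sequences_of_colors_spec : Claim_equal_find_sequences_of_colors := by
  intro line _
  show find_sequences_of_colors line = find_sequences_of_colors_alt line
  unfold find_sequences_of_colors find_sequences_of_colors_alt
  rw [pvA_seqs_eq]
  have hempA : (PySem.Dict.empty : PySem.Dict String (List (List String))).items = [] := rfl
  have hempB : (PySem.Dict.empty : PySem.Dict String (List String)).items = [] := rfl
  obtain ⟨g1, g2, g3⟩ := pvFold_pres (pvRuns line) PySem.Dict.empty PySem.Dict.empty
    (by rw [hempA, hempB]; rfl) PySem.Dict.nodup_keys_empty
    (by intro p hp; rw [hempA] at hp; cases hp)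
  rw [g1, pvAFlatten, pvFlatten_items _ PySem.Dict.empty g3
    (by intro p _; simp) g2, hempB, List.nil_append]
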